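-- pv_equiv track=rewrite | github.com/Perkkola/qiskitcodes | regression_iqm.py | post_select
-- ===== SOURCE A (Python) =====
-- def cut_counts(counts, bit_indexes):
--     bit_indexes.sort(reverse=True)
--     new_counts = {}
--
--     for key in counts:
--         # if(key[-1] == '1' and key[-2] == '0'):
--         # if(key[-1] == '0'):
--         new_key = ''
--         for index in bit_indexes:
--             new_key += key[-1 - index]
--         if new_key in new_counts:
--             new_counts[new_key] += counts[key]
--         else:
--             new_counts[new_key] = counts[key]
--     return new_counts
--
-- def post_select(counts, x_index_list):
--
--     x_counts = cut_counts(counts, x_index_list)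
--     expval = 0
--     for key, value in zip(x_counts.keys(), x_counts.values()):
--         if(key.count('1') % 2 == 0):
--             expval += value
--         else:
--             expval -= value
--     return expval
-- ===== SOURCE B (Python) =====
-- def post_select(counts, x_index_list):
--     # Single pass over counts: sign each count by the parity of the selected bits.
--     # (keeps A's in-place reverse sort of x_index_list, its observable side effect)
--     x_index_list.sort(reverse=True)
--     expval = 0
--     for key, value in counts.items():
--         ones = 0
--         for index in x_index_list:
--             if key[-1 - index] == '1':
--                 ones += 1
--         if ones % 2 == 0:
--             expval += value
--         else:
--             expval -= value
--     return expval
-- ===== Notes on version B (the rewrite author's own statement) =====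
-- stated objective: simpler
-- what changed: B removes the intermediate x_counts dict and the second loop: one pass over counts.items() counts the selected bits' parity per key and adds or subtracts the count directly (it keeps A's in-place reverse sort of x_index_list).
import Mathlib
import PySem

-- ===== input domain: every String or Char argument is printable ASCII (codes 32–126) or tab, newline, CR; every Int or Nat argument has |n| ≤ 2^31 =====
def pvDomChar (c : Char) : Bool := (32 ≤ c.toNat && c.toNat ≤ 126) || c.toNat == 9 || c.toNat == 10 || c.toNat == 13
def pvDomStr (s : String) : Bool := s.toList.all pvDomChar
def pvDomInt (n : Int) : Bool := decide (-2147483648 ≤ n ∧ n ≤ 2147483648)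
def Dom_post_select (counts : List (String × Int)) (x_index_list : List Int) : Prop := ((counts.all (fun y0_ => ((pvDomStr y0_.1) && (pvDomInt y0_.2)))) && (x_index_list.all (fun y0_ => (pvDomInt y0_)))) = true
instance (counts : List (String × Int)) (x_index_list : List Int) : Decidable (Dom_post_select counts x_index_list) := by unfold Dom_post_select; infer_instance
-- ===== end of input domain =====

-- B folds counts once, signing each count by the parity of its selected bits, instead of
-- grouping into an intermediate dict first (A also reverse-sorts x_index_list in place; B
-- performs the same mutation in Python — the equivalence proved here is about the return value).


-- ===== PORT A =====
def post_select (counts : List (String × Int)) (x_index_list : List Int) : Int :=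
  -- counts is a Python dict: decode the association list with dict semantics (PySem.Dict.ofList)
  let d : PySem.Dict (List Char) Int := PySem.Dict.ofList (counts.map (fun p => (p.1.toList, p.2)))
  -- cut_counts: bit_indexes.sort(reverse=True)
  let bit_indexes := PySem.List.sorted x_index_list id true
  -- cut_counts: for key in counts: build new_key char by char, then group counts[key] by new_key
  let x_counts : PySem.Dict (List Char) Int :=
    d.items.foldl (fun nc p =>
      let new_key := bit_indexes.foldl (fun s i => s ++ [PySem.List.pyGetD p.1 (-1 - i) '?']) []
      if nc.contains new_key then nc.insert new_key (nc.getD new_key 0 + d.getD p.1 0)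
      else nc.insert new_key (d.getD p.1 0)) PySem.Dict.empty
  -- for key, value in zip(x_counts.keys(), x_counts.values()): expval ± value by key.count('1') parity
  ((x_counts.items.map (·.1)).zip (x_counts.items.map (·.2))).foldl
    (fun expval kv => if PySem.Chars.count kv.1 ['1'] % 2 == 0 then expval + kv.2 else expval - kv.2) 0

-- ===== PORT B =====
def post_select_alt (counts : List (String × Int)) (x_index_list : List Int) : Int :=
  let d : PySem.Dict (List Char) Int := PySem.Dict.ofList (counts.map (fun p => (p.1.toList, p.2)))
  let xs := PySem.List.sorted x_index_list id true
  d.items.foldl (fun expval p =>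
    let ones := xs.foldl (fun n i => if PySem.List.pyGetD p.1 (-1 - i) '?' == '1' then n + 1 else n) (0 : Int)
    if PySem.Int.mod ones 2 == 0 then expval + p.2 else expval - p.2) 0

-- ===== PRECONDITION & SPEC =====
-- Pre_ excludes exactly the inputs where key[-1 - index] is out of range for some key of counts
-- and some index of x_index_list: there the Python A (and B) raises IndexError.
def Pre_post_select (counts : List (String × Int)) (x_index_list : List Int) : Prop :=
  ∀ p ∈ counts, ∀ i ∈ x_index_list, PySem.Raise.InRange p.1.toList.length (-1 - i)
instance (counts : List (String × Int)) (x_index_list : List Int) : Decidable (Pre_post_select counts x_index_list) := by unfold Pre_post_select; infer_instance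
def pvWitness_post_select : (List (String × Int)) × List Int := ([("01", 3), ("11", -2)], [0, 1])
def Spec_post_select (counts : List (String × Int)) (x_index_list : List Int) (out : Int) : Prop := out = post_select_alt counts x_index_list
instance (counts : List (String × Int)) (x_index_list : List Int) (out : Int) : Decidable (Spec_post_select counts x_index_list out) := by unfold Spec_post_select; infer_instance

-- ===== CLAIM (what is proved, stated in full; the proofs are below) =====
def Claim_equal_post_select : Prop := ∀ (counts : List (String × Int)) (x_index_list : List Int), Dom_post_select counts x_index_list → Pre_post_select counts x_index_list → Spec_post_select counts x_index_list (post_select counts x_index_list)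

-- ===== LEMMAS AND PROOFS =====

-- the sign A's second loop gives a grouped entry, as a signed value
def pvT (k : List Char) (v : Int) : Int := if PySem.Chars.count k ['1'] % 2 == 0 then v else -v

-- the signed total of a grouping dict
def pvS (nc : PySem.Dict (List Char) Int) : Int := (nc.items.map (fun q => pvT q.1 q.2)).sum

-- str.count with a single-character needle is the character count
lemma pvCount_go_one (fuel : Nat) : ∀ (l : List Char) (acc : Nat), l.length ≤ fuel →
    PySem.Chars.count.go ['1'] fuel l acc = acc + l.count '1' := by
  induction fuel with
  | zero =>
    intro l acc h
    cases l with
    | nil => simp [PySem.Chars.count.go]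
    | cons c t => simp at h
  | succ n ih =>
    intro l acc h
    cases l with
    | nil => simp [PySem.Chars.count.go]
    | cons c t =>
      simp only [PySem.Chars.count.go]
      by_cases hc : c = '1'
      · subst hc
        rw [if_pos (by simp [List.isPrefixOf])]
        simp only [List.length_cons, List.drop_succ_cons, List.drop_zero, List.length_nil]
        rw [ih t (acc + 1) (by simpa using h)]
        simp
        omega
      · rw [if_neg (by simp [List.isPrefixOf, Ne.symm hc])]
        rw [ih t acc (by simpa using h)]
        simp [hc]
lemma pvCount_one (l : List Char) : PySem.Chars.count l ['1'] = l.count '1' := by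
  simpa [PySem.Chars.count] using pvCount_go_one l.length l 0 le_rfl

lemma pvT_add (k : List Char) (w v : Int) : pvT k (w + v) = pvT k w + pvT k v := by
  unfold pvT; split <;> ring

-- replacing the unique entry at key nk by (nk, w + v) adds pvT nk v to the signed total
lemma pvSum_subst (items : List (List Char × Int)) (nk : List Char) (w v : Int)
    (hnd : (items.map Prod.fst).Nodup) (hmem : (nk, w) ∈ items) :
    ((items.map (fun q => if q.1 == nk then (nk, w + v) else q)).map (fun q => pvT q.1 q.2)).sum
      = (items.map (fun q => pvT q.1 q.2)).sum + pvT nk v := by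
  induction items with
  | nil => simp at hmem
  | cons p t ih =>
    simp only [List.map_cons, List.nodup_cons, List.mem_map] at hnd
    by_cases hp : p.1 = nk
    · have hpw : p = (nk, w) := by
        rcases List.mem_cons.mp hmem with h | h
        · exact h.symm
        · exact absurd ⟨(nk, w), h, hp.symm⟩ hnd.1
      have htid : t.map (fun q => if q.1 == nk then (nk, w + v) else q) = t := by
        have : ∀ q ∈ t, (if q.1 == nk then (nk, w + v) else q) = id q := by
          intro q hq
          have hne : q.1 ≠ nk := fun he => hnd.1 ⟨q, hq, hp ▸ he⟩
          simp [hne]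
        simpa using List.map_congr_left this
      subst hpw
      rw [List.map_cons, htid]
      simp only [List.map_cons, List.sum_cons, if_pos (by simp : (((nk, w).1 == nk) = true))]
      rw [pvT_add]
      ring
    · have hmem' : (nk, w) ∈ t := by
        rcases List.mem_cons.mp hmem with h | h
        · exact absurd (congrArg Prod.fst h.symm) hp
        · exact h
      simp only [List.map_cons, List.sum_cons]
      rw [ih hnd.2 hmem', if_neg (by simpa using hp : ¬ ((p.1 == nk) = true))]
      ring

-- one step of A's grouping loop adds pvT nk v to the signed total
lemma pvS_step (nc : PySem.Dict (List Char) Int) (nk : List Char) (v : Int)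
    (h : nc.keys.Nodup) :
    pvS (if nc.contains nk then nc.insert nk (nc.getD nk 0 + v) else nc.insert nk v)
      = pvS nc + pvT nk v := by
  by_cases hc : nc.contains nk = true
  · rw [if_pos hc]
    have hk : nk ∈ nc.keys := (PySem.Dict.contains_iff_mem_keys nc nk).mp hc
    have hkeys : nc.keys = nc.items.map Prod.fst := by
      simp only [PySem.Dict.keys]
    rw [hkeys] at hk h
    rcases List.mem_map.mp hk with ⟨q, hq, hq1⟩
    have hmem : (nk, q.2) ∈ nc.items := by cases q; simp_all
    have hgd : nc.getD nk 0 = q.2 := by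
      apply PySem.Dict.getD_of_mem_items nc hmem
      simpa [PySem.Dict.keys] using h
    unfold pvS
    rw [PySem.Dict.items_insert_of_contains nc _ hc, hgd]
    exact pvSum_subst nc.items nk q.2 v h hmem
  · rw [if_neg hc]
    unfold pvS
    rw [PySem.Dict.items_insert_of_not_contains nc _ (by simpa using hc)]
    simp

-- A's whole grouping loop: the signed total of the built dict is the signed sum of the entries
lemma pvS_loop (key : (List Char × Int) → List Char) (val : (List Char × Int) → Int) :
    ∀ (L : List (List Char × Int)) (nc : PySem.Dict (List Char) Int), nc.keys.Nodup →
    pvS (L.foldl (fun nc p =>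
          if nc.contains (key p) then nc.insert (key p) (nc.getD (key p) 0 + val p)
          else nc.insert (key p) (val p)) nc)
      = pvS nc + (L.map (fun p => pvT (key p) (val p))).sum := by
  intro L
  induction L with
  | nil => intro nc h; simp
  | cons p t ih =>
    intro nc h
    have hstep := pvS_step nc (key p) (val p) h
    have hnd' : (if nc.contains (key p) then nc.insert (key p) (nc.getD (key p) 0 + val p)
        else nc.insert (key p) (val p)).keys.Nodup := by
      split <;> exact PySem.Dict.nodup_keys_insert _ _ _ h
    simp only [List.foldl_cons, List.map_cons, List.sum_cons]
    rw [ih _ hnd', hstep]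
    ring

-- the ±-accumulating fold is adding the signed values
lemma pvFold_pm (L : List (List Char × Int)) (a : Int) :
    L.foldl (fun expval kv => if PySem.Chars.count kv.1 ['1'] % 2 == 0 then expval + kv.2 else expval - kv.2) a
      = a + (L.map (fun q => pvT q.1 q.2)).sum := by
  have : ∀ (e : Int) (kv : List Char × Int),
      (if PySem.Chars.count kv.1 ['1'] % 2 == 0 then e + kv.2 else e - kv.2) = e + pvT kv.1 kv.2 := by
    intro e kv; unfold pvT; split <;> ring
  rw [PySem.List.foldl_congr_mem L _ (fun e kv => e + pvT kv.1 kv.2) a (fun acc x _ => this acc x)]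
  exact PySem.List.foldl_add L _ a

-- Python's ones % 2 == 0 on the nonnegative counter is the Nat parity test
lemma pvCond (c : Nat) : (PySem.Int.mod (c : Int) 2 == 0) = (c % 2 == 0) := by
  have h : PySem.Int.mod (c : Int) 2 = ((c % 2 : Nat) : Int) := by
    exact_mod_cast PySem.Int.mod_natCast c 2
  rw [h]
  simp
  omega

-- a char-by-char built key's '1'-count is the count of selected positions that read '1'
lemma pvCount_key (bs : List Int) (g : Int → Char) :
    (List.map g bs).count '1' = bs.countP (fun i => g i == '1') := by
  rw [List.count_eq_countP, List.countP_map]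
  rfl

lemma main_eq (counts : List (String × Int)) (x_index_list : List Int) :
    post_select counts x_index_list = post_select_alt counts x_index_list := by
  simp only [post_select, post_select_alt]
  set d : PySem.Dict (List Char) Int := PySem.Dict.ofList (counts.map (fun p => (p.1.toList, p.2))) with hd
  set bs := PySem.List.sorted x_index_list id true with hbs
  have hnd : d.keys.Nodup := by rw [hd]; exact PySem.Dict.nodup_keys_ofList _
  -- A's final loop runs over the grouped dict's items
  rw [List.zip_map']
  simp only [Prod.mk.eta]
  rw [pvFold_pm, zero_add]
  -- the grouping loop's signed total is the signed sum of the entries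
  have hA := pvS_loop (fun p => bs.foldl (fun s i => s ++ [PySem.List.pyGetD p.1 (-1 - i) '?']) [])
      (fun p => d.getD p.1 0) d.items PySem.Dict.empty (by simp [PySem.Dict.keys, PySem.Dict.empty])
  unfold pvS at hA
  simp only [List.map_id']
  rw [hA]
  simp only [PySem.Dict.empty, List.map_nil, List.sum_nil, zero_add]
  -- B's loop adds the same signed values entry by entry
  rw [PySem.List.foldl_congr_mem d.items _
      (fun e p => e + pvT (bs.map (fun i => PySem.List.pyGetD p.1 (-1 - i) '?')) p.2) 0 ?_]
  · rw [PySem.List.foldl_add, zero_add]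
    apply congrArg List.sum
    apply List.map_congr_left
    intro p hp
    have hget : d.getD p.1 0 = p.2 :=
      PySem.Dict.getD_of_mem_items d (by simpa using hp) hnd 0
    rw [PySem.List.foldl_append_singleton_eq_map, List.nil_append, hget]
  · intro acc p _
    rw [PySem.List.foldl_count_if, zero_add]
    beta_reduce
    unfold pvT
    rw [pvCount_one, pvCount_key, pvCond]
    split <;> ring

-- ===== VERDICT (by name: the statement is the Claim_ definition above) =====
theorem post_select_spec : Claim_equal_post_select := by
  intro counts x_index_list _ _
  unfold Spec_post_select
  exact main_eq counts x_index_list
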